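-- pv_equiv track=rewrite | github.com/wangzizhe/GateForge | gateforge/agent_modelica_v0_3_13_runtime_live_evidence.py | _has_false_then_true
-- ===== SOURCE A (Python) =====
-- def _has_false_then_true(values: list[bool]) -> bool:
--     seen_false = False
--     for value in values:
--         if value is False:
--             seen_false = True
--         elif value is True and seen_false:
--             return True
--     return False
-- ===== SOURCE B (Python) =====
-- def _has_false_then_true(values: list[bool]) -> bool:
--     idx = None
--     for i, v in enumerate(values):
--         if v is False:
--             idx = i
--             break
--     if idx is None:
--         return False
--     return any(v is True for v in values[idx + 1:])
-- ===== Notes on version B (the rewrite author's own statement) =====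
-- stated objective: alternative
-- what changed: Replaced the flag-passing single loop with a two-phase decomposition: find the index of the first False, then scan the suffix after it for a True.
import Mathlib
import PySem

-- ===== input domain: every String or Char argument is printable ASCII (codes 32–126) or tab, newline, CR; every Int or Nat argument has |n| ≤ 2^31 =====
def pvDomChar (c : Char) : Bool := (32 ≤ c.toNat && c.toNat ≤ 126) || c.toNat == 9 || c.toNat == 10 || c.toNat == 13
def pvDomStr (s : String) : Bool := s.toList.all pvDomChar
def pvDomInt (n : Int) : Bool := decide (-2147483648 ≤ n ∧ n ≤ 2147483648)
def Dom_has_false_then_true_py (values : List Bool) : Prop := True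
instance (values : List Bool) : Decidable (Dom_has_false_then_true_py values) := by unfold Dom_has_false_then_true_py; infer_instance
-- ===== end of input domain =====

-- B replaces A's flag-passing single loop with find-first-False then scan-the-suffix-for-True; same cost, different decomposition.

-- ===== PORT A =====
-- the loop carries the `seen_false` flag; early return on a True preceded by a False
def hfttGoA : List Bool → Bool → Bool
  | [], _ => false
  | v :: rest, seen =>
    if v = false then hfttGoA rest true
    else if v = true && seen then true
    else hfttGoA rest seen

def has_false_then_true_py (values : List Bool) : Bool := hfttGoA values false

-- ===== PORT B =====
-- phase 1: index of the first False (break on first hit); phase 2: any True in the suffix after it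
def has_false_then_true_py_alt (values : List Bool) : Bool :=
  match values.findIdx? (fun v => v = false) with
  | none => false
  | some i => (values.drop (i + 1)).any (fun v => v = true)

-- ===== PRECONDITION & SPEC =====
def Spec_has_false_then_true_py (values : List Bool) (out : Bool) : Prop := out = has_false_then_true_py_alt values
instance (values : List Bool) (out : Bool) : Decidable (Spec_has_false_then_true_py values out) := by unfold Spec_has_false_then_true_py; infer_instance

-- ===== CLAIM (what is proved, stated in full; the proofs are below) =====
def Claim_equal_has_false_then_true_py : Prop := ∀ (values : List Bool), Dom_has_false_then_true_py values → Spec_has_false_then_true_py values (has_false_then_true_py values)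

-- ===== LEMMAS AND PROOFS =====

-- once a False has been seen, A's loop returns whether any later element is True
theorem hfttGoA_true (l : List Bool) : hfttGoA l true = l.any (fun v => v = true) := by
  induction l with
  | nil => rfl
  | cons v rest ih =>
    cases v <;> simp [hfttGoA, ih]

theorem hfttGoA_false_eq_alt (l : List Bool) : hfttGoA l false = has_false_then_true_py_alt l := by
  induction l with
  | nil => rfl
  | cons v rest ih =>
    cases v with
    | false =>
      simp [hfttGoA, has_false_then_true_py_alt, List.findIdx?_cons, hfttGoA_true]
    | true =>
      simp only [hfttGoA, has_false_then_true_py_alt, List.findIdx?_cons] at ih ⊢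
      cases h : rest.findIdx? (fun v => v = false) with
      | none => simp only [h] at ih; simpa [h] using ih
      | some i => simp only [h] at ih; simpa [h, List.drop] using ih

-- ===== VERDICT (by name: the statement is the Claim_ definition above) =====
theorem has_false_then_true_py_spec : Claim_equal_has_false_then_true_py := by
  intro values _
  unfold Spec_has_false_then_true_py has_false_then_true_py
  exact hfttGoA_false_eq_alt values
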